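-- pv_equiv track=rewrite | github.com/nicosalaz/pythonProject | ElcPro/Parcial - Nicolas Salazar/similitudEntrePalabras.py | similitud
-- ===== SOURCE A (Python) =====
-- letters = [] #lista auxiliar para evitar que se repitan la evaluacion de letras
--
-- def similitud(p1,p2):
--     num = 0
--     for x in range(0,len(p1)):
--         for y in range(0,len(p2)):
--             # validacion para que ambas letras existan en ambas palabras y no se hayan evaluado anteriormente
--             if (p1[x] in p1) == True and (p1[x] in p2) == True and (p1[x] in letters) == False:
--                 #validacion para sumar la cantidad correcta de veces que se repite una letra en ambas palabras
--                 if p1.count(p1[x]) < p2.count(p1[x]):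
--                     num += p1.count(p1[x])
--                 else:
--                     num+= p2.count(p1[x])
--                 letters.append(p1[x])#me agrega las letras ya evaluadas para no repetirlas
--     letters.clear() #setea la lista para evaluar nuevas palabras
--     return num
-- ===== SOURCE B (Python) =====
-- def similitud(p1, p2):
--     a = sorted(p1)
--     b = sorted(p2)
--     i = j = num = 0
--     while i < len(a) and j < len(b):
--         if a[i] == b[j]:
--             num += 1
--             i += 1
--             j += 1
--         elif a[i] < b[j]:
--             i += 1
--         else:
--             j += 1
--     return num
-- ===== Notes on version B (the rewrite author's own statement) =====
-- stated objective: faster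
-- what changed: Replaced the O(n*m)-iteration nested loop with repeated .count scans by sort-both-strings plus a linear two-pointer merge that counts matching characters.
import Mathlib
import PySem

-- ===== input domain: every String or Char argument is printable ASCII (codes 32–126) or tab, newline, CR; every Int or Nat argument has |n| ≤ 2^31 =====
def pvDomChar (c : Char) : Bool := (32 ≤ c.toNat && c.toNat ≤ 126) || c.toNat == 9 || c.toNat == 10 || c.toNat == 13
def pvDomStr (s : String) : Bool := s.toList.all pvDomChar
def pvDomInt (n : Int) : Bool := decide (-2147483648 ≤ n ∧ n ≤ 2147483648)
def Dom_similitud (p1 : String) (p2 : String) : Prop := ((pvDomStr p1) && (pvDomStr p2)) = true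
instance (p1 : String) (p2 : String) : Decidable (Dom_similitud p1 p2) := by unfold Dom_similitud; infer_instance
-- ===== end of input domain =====

-- B replaces the nested repeated-.count scan by sorting both words and counting common
-- characters with a single two-pointer merge (objective: faster).
-- Note: A's global 'letters' list is cleared before returning, so A is observably pure.

-- ===== PORT A =====
-- One iteration body of A's inner loop (p1[x] is a single character, so Python's
-- substring 'in'/'.count' on it are exactly char membership / char count).
def pvStepA (a b : List Char) (s : Int × List Char) (c : Char) : Int × List Char :=
  if c ∈ a ∧ c ∈ b ∧ c ∉ s.2 then
    (if a.count c < b.count c then (s.1 + (a.count c : Int), s.2 ++ [c])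
     else (s.1 + (b.count c : Int), s.2 ++ [c]))
  else s

def similitud (p1 : String) (p2 : String) : Int :=
  let a := p1.toList
  let b := p2.toList
  let r := (PySem.List.pyRange 0 (a.length : Int) 1).foldl
    (fun s x =>
      (PySem.List.pyRange 0 (b.length : Int) 1).foldl
        (fun s _y => pvStepA a b s (PySem.List.pyGetD a x ' ')) s)
    ((0 : Int), ([] : List Char))
  r.1  -- letters.clear(); return num

-- ===== PORT B =====
-- the while loop of Source B: i, j only ever grow from 0, so Nat indices are exact
def pvMergeLoop (a b : List Char) (i j : Nat) (num : Int) : Int :=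
  if h : i < a.length ∧ j < b.length then
    if a[i] = b[j] then pvMergeLoop a b (i+1) (j+1) (num+1)
    else if a[i] < b[j] then pvMergeLoop a b (i+1) j num
    else pvMergeLoop a b i (j+1) num
  else num
termination_by a.length - i + (b.length - j)

def similitud_alt (p1 : String) (p2 : String) : Int :=
  let a := PySem.List.sorted p1.toList (fun c => c) false
  let b := PySem.List.sorted p2.toList (fun c => c) false
  pvMergeLoop a b 0 0 0

-- ===== PRECONDITION & SPEC =====
def Spec_similitud (p1 : String) (p2 : String) (out : Int) : Prop := out = similitud_alt p1 p2
instance (p1 : String) (p2 : String) (out : Int) : Decidable (Spec_similitud p1 p2 out) := by unfold Spec_similitud; infer_instance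

-- ===== CLAIM (what is proved, stated in full; the proofs are below) =====
def Claim_equal_similitud : Prop := ∀ (p1 : String) (p2 : String), Dom_similitud p1 p2 → Spec_similitud p1 p2 (similitud p1 p2)

-- ===== LEMMAS AND PROOFS =====

-- common value: the number of shared characters with multiplicity
def pvSim (a b : List Char) : Nat := Multiset.card ((a : Multiset Char) ∩ (b : Multiset Char))

-- ---- B side ----
lemma pvMergeLoop_eq (a b : List Char) (ha : a.Pairwise (· ≤ ·)) (hb : b.Pairwise (· ≤ ·)) :
    ∀ i j (num : Int), pvMergeLoop a b i j num = num + pvSim (a.drop i) (b.drop j) := by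
  intro i j num
  induction i, j, num using pvMergeLoop.induct a b with
  | case1 i j num h heq ih =>
    rw [pvMergeLoop]
    simp only [h, and_self, dif_pos, if_pos heq, ih]
    rw [List.drop_eq_getElem_cons h.1, List.drop_eq_getElem_cons h.2, ← heq]
    unfold pvSim
    rw [← Multiset.cons_coe, ← Multiset.cons_coe,
      Multiset.cons_inter_of_pos _ (Multiset.mem_cons_self _ _), Multiset.erase_cons_head,
      Multiset.card_cons]
    push_cast
    ring
  | case2 i j num h heq hlt ih =>
    rw [pvMergeLoop]
    simp only [h, and_self, dif_pos, if_neg heq, if_pos hlt, ih]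
    have hsort := hb.sublist (List.drop_sublist j b)
    rw [List.drop_eq_getElem_cons h.2] at hsort
    have hnot : a[i] ∉ ((b.drop j : List Char) : Multiset Char) := by
      rw [List.drop_eq_getElem_cons h.2]
      simp only [Multiset.mem_coe, List.mem_cons]
      rintro (he | hm)
      · exact heq he
      · exact absurd (lt_of_lt_of_le hlt (List.rel_of_pairwise_cons hsort hm)) (lt_irrefl _)
    rw [List.drop_eq_getElem_cons h.1]
    unfold pvSim
    rw [← Multiset.cons_coe, Multiset.cons_inter_of_neg _ hnot]
  | case3 i j num h heq hlt ih =>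
    rw [pvMergeLoop]
    simp only [h, and_self, dif_pos, if_neg heq, if_neg hlt, ih]
    have hyx : b[j] < a[i] := lt_of_le_of_ne (not_lt.1 hlt) (fun e => heq e.symm)
    have hsort := ha.sublist (List.drop_sublist i a)
    rw [List.drop_eq_getElem_cons h.1] at hsort
    have hnot : b[j] ∉ ((a.drop i : List Char) : Multiset Char) := by
      rw [List.drop_eq_getElem_cons h.1]
      simp only [Multiset.mem_coe, List.mem_cons]
      rintro (he | hm)
      · exact heq he.symm
      · exact absurd (lt_of_lt_of_le hyx (List.rel_of_pairwise_cons hsort hm)) (lt_irrefl _)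
    rw [List.drop_eq_getElem_cons h.2]
    unfold pvSim
    conv_rhs => rw [Multiset.inter_comm]
    rw [← Multiset.cons_coe, Multiset.cons_inter_of_neg _ hnot, Multiset.inter_comm]
  | case4 i j num h =>
    rw [pvMergeLoop]
    simp only [h, dif_neg, not_false_iff]
    rcases not_and_or.1 h with hi | hj
    · rw [List.drop_eq_nil_of_le (not_lt.1 hi)]
      unfold pvSim
      simp
    · rw [List.drop_eq_nil_of_le (not_lt.1 hj)]
      unfold pvSim
      simp

lemma alt_eq (p1 p2 : String) : similitud_alt p1 p2 = (pvSim p1.toList p2.toList : Int) := by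
  unfold similitud_alt
  rw [pvMergeLoop_eq _ _ (PySem.List.sorted_pairwise _ _) (PySem.List.sorted_pairwise _ _)]
  simp only [List.drop_zero, zero_add]
  unfold pvSim
  rw [Multiset.coe_eq_coe.2 (PySem.List.sorted_perm _ _ _),
    Multiset.coe_eq_coe.2 (PySem.List.sorted_perm _ _ _)]

-- ---- A side ----
def pvT (a b l L : List Char) : Nat :=
  ∑ c ∈ ((l.toFinset \ L.toFinset).filter (fun c => c ∈ b)), min (a.count c) (b.count c)

-- a fold whose step fixes the state is the identity
lemma pvFoldlSkip {α β : Type} (g : α → α) (s : α) (hs : g s = s) :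
    ∀ ys : List β, ys.foldl (fun s _ => g s) s = s
  | [] => rfl
  | _ :: t => by rw [List.foldl_cons, hs]; exact pvFoldlSkip g s hs t

-- A's inner loop over range(len(p2)) acts exactly once
lemma pvInner_eq (a b : List Char) (c : Char) (s : Int × List Char) :
    (PySem.List.pyRange 0 (b.length : Int) 1).foldl (fun s _ => pvStepA a b s c) s
      = pvStepA a b s c := by
  by_cases hcond : c ∈ a ∧ c ∈ b ∧ c ∉ s.2
  · have hb0 : (0 : Int) < (b.length : Int) := by
      have := List.length_pos_of_mem hcond.2.1
      exact_mod_cast this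
    rw [PySem.List.pyRange_one_cons hb0, List.foldl_cons]
    have hmem : c ∈ (pvStepA a b s c).2 := by
      unfold pvStepA
      rw [if_pos hcond]
      split_ifs <;> simp
    have hfix : pvStepA a b (pvStepA a b s c) c = pvStepA a b s c := by
      generalize pvStepA a b s c = t at hmem ⊢
      unfold pvStepA
      rw [if_neg (fun hc => hc.2.2 hmem)]
    exact pvFoldlSkip (fun s => pvStepA a b s c) _ hfix _
  · have hfix : pvStepA a b s c = s := by unfold pvStepA; rw [if_neg hcond]
    rw [hfix]
    exact pvFoldlSkip (fun s => pvStepA a b s c) s hfix _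

-- contribution of a fresh character (in b, not yet evaluated)
lemma pvT_cons_mem (a b t L : List Char) (c : Char) (hcb : c ∈ b) (hcL : c ∉ L) :
    pvT a b (c :: t) L = min (a.count c) (b.count c) + pvT a b t (L ++ [c]) := by
  unfold pvT
  have hset : ((c :: t).toFinset \ L.toFinset).filter (fun x => x ∈ b)
      = insert c ((t.toFinset \ (L ++ [c]).toFinset).filter (fun x => x ∈ b)) := by
    ext x
    by_cases hxc : x = c
    · subst hxc
      simp [hcb, hcL]
    · simp only [Finset.mem_filter, Finset.mem_sdiff, List.mem_toFinset, List.mem_cons,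
        List.mem_append, Finset.mem_insert, hxc, false_or,
        not_or]
      tauto
  have hnotin : c ∉ (t.toFinset \ (L ++ [c]).toFinset).filter (fun x => x ∈ b) := by
    simp
  rw [hset, Finset.sum_insert hnotin]

-- a character not in b, or already evaluated, contributes nothing
lemma pvT_cons_skip (a b t L : List Char) (c : Char) (h : c ∉ b ∨ c ∈ L) :
    pvT a b (c :: t) L = pvT a b t L := by
  unfold pvT
  congr 1
  ext x
  by_cases hxc : x = c
  · subst hxc
    rcases h with h | h <;> simp [h]
  · simp only [Finset.mem_filter, Finset.mem_sdiff, List.mem_toFinset, List.mem_cons, hxc,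
      false_or]

-- invariant of A's outer loop
lemma pvFoldA (a b : List Char) : ∀ (l : List Char), (∀ c ∈ l, c ∈ a) →
    ∀ (num : Int) (L : List Char),
    (l.foldl (fun s c => pvStepA a b s c) (num, L)).1 = num + (pvT a b l L : Int) := by
  intro l
  induction l with
  | nil => intro _ num L; simp [pvT]
  | cons c t ih =>
    intro hl num L
    rw [List.foldl_cons]
    have hca : c ∈ a := hl c List.mem_cons_self
    have hlt : ∀ x ∈ t, x ∈ a := fun x hx => hl x (List.mem_cons_of_mem _ hx)
    by_cases hcb : c ∈ b ∧ c ∉ L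
    · have hstep : pvStepA a b (num, L) c
          = (num + (min (a.count c) (b.count c) : Int), L ++ [c]) := by
        unfold pvStepA
        rw [if_pos ⟨hca, hcb.1, hcb.2⟩]
        split_ifs with hab <;>
          simp only [Prod.mk.injEq, and_true] <;> omega
      rw [hstep, ih hlt, pvT_cons_mem a b t L c hcb.1 hcb.2]
      push_cast
      ring
    · have hstep : pvStepA a b (num, L) c = (num, L) := by
        unfold pvStepA
        rw [if_neg (fun hc => hcb ⟨hc.2.1, hc.2.2⟩)]
      rw [hstep, ih hlt, pvT_cons_skip a b t L c (by tauto)]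

lemma a_eq (p1 p2 : String) :
    similitud p1 p2 = (pvT p1.toList p2.toList p1.toList [] : Int) := by
  show (List.foldl
      (fun s x => List.foldl (fun s _y => pvStepA p1.toList p2.toList s (PySem.List.pyGetD p1.toList x ' '))
        s (PySem.List.pyRange 0 (p2.toList.length : Int) 1))
      ((0 : Int), ([] : List Char)) (PySem.List.pyRange 0 (p1.toList.length : Int) 1)).1
    = (pvT p1.toList p2.toList p1.toList [] : Int)
  have h1 : (fun (s : Int × List Char) (x : Int) =>
        (PySem.List.pyRange 0 ((p2.toList).length : Int) 1).foldl
          (fun s _ => pvStepA p1.toList p2.toList s (PySem.List.pyGetD p1.toList x ' ')) s)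
      = fun s x => pvStepA p1.toList p2.toList s (PySem.List.pyGetD p1.toList x ' ') :=
    funext fun s => funext fun x => pvInner_eq _ _ _ _
  rw [h1, PySem.List.foldl_pyRange_zero_pyGetD' p1.toList ' '
    (fun s c => pvStepA p1.toList p2.toList s c) ((0 : Int), ([] : List Char))]
  rw [pvFoldA p1.toList p2.toList p1.toList (fun _ h => h)]
  simp

lemma sim_eq_sum (a b : List Char) : pvSim a b = pvT a b a [] := by
  unfold pvSim pvT
  rw [← Multiset.toFinset_sum_count_eq]
  have hset : ((a : Multiset Char) ∩ (b : Multiset Char)).toFinset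
      = (a.toFinset \ (List.nil : List Char).toFinset).filter (fun x => x ∈ b) := by
    ext x
    simp
  rw [hset]
  refine Finset.sum_congr rfl fun x _ => ?_
  rw [Multiset.count_inter]
  simp

-- ===== VERDICT (by name: the statement is the Claim_ definition above) =====
theorem similitud_spec : Claim_equal_similitud := by
  intro p1 p2 _
  unfold Spec_similitud
  rw [a_eq, alt_eq, sim_eq_sum]
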